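-- pv_equiv track=rewrite | github.com/dissna/ithillel_basic_python_alekseykubarev | homework_9/task_5.py | group_by_surname
-- ===== SOURCE A (Python) =====
-- def group_by_surname(list):
--     groups = {
--         'A-I': 0,
--         'J-P': 0,
--         'Q-T': 0,
--         'U-Z': 0
--     }
--
--     for student in list:
--         surname = student.split()[1]
--         first_letter = surname[0].lower()
--
--         if first_letter >= 'a' and first_letter <= 'i':
--             groups['A-I'] += 1
--         elif first_letter >= 'j' and first_letter <= 'p':
--             groups['J-P'] += 1
--         elif first_letter >= 'q' and first_letter <= 't':
--             groups['Q-T'] += 1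
--         elif first_letter >= 'u' and first_letter <= 'z':
--             groups['U-Z'] += 1
--
--     return [groups[group] for group in groups]
-- ===== SOURCE B (Python) =====
-- def group_by_surname(list):
--     # Sort the (lowercased, a-z-filtered) surname initials, then cut the sorted
--     # sequence at the boundaries 'i','p','t','z': each group's count is the
--     # length of the prefix not exceeding its boundary.
--     letters = sorted(c for c in (s.split()[1][0].lower() for s in list)
--                      if 'a' <= c <= 'z')
--     result = []
--     for bound in 'iptz':
--         n = 0
--         while n < len(letters) and letters[n] <= bound:
--             n += 1
--         result.append(n)
--         letters = letters[n:]
--     return result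
-- ===== Notes on version B (the rewrite author's own statement) =====
-- stated objective: alternative
-- what changed: Replaces A's per-student if/elif dict tally by sort-then-cut: collect the lowercased a-z surname initials, sort them, and read each group's count off the sorted sequence as the length of the prefix not exceeding its boundary
import Mathlib
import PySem

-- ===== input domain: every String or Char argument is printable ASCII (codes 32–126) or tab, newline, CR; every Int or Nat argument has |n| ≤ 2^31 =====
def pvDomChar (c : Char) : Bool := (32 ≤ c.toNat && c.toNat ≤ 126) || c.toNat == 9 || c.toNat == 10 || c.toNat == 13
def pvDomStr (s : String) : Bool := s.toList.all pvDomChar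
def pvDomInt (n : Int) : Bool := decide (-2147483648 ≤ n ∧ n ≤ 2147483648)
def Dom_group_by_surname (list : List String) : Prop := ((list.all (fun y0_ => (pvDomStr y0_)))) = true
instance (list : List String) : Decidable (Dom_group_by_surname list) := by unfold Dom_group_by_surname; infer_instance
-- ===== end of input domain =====

-- B replaces A's per-student if/elif tally by sort-then-cut: sort the initials and cut the
-- sorted run at the four boundaries; same results on Pre_ (A raises IndexError outside it).

-- ===== PORT A =====
-- first_letter = student.split()[1][0].lower(); none = IndexError (excluded by Pre_)
def pyLetterA? (student : String) : Option Char :=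
  match PySem.List.pyGet? (PySem.Str.split₀ student) 1 with
  | none => none
  | some surname => (PySem.Str.pyGet? surname 0).map PySem.Chars.lowerChar

-- one iteration of A's for-loop; groups[k] += 1 on an existing key is d.modify k 0 (·+1)
def groupStepA (d : PySem.Dict String Int) (student : String) : PySem.Dict String Int :=
  match pyLetterA? student with
  | none => d  -- unreachable under Pre_ (Python raises IndexError)
  | some c =>
    if 'a' ≤ c ∧ c ≤ 'i' then d.modify "A-I" 0 (· + 1)
    else if 'j' ≤ c ∧ c ≤ 'p' then d.modify "J-P" 0 (· + 1)
    else if 'q' ≤ c ∧ c ≤ 't' then d.modify "Q-T" 0 (· + 1)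
    else if 'u' ≤ c ∧ c ≤ 'z' then d.modify "U-Z" 0 (· + 1)
    else d

def group_by_surname (list : List String) : List Int :=
  let groups := PySem.Dict.ofList [("A-I", (0 : Int)), ("J-P", 0), ("Q-T", 0), ("U-Z", 0)]
  let d := list.foldl groupStepA groups
  d.keys.map (fun k => d.getD k 0)

-- ===== PORT B =====
-- the generator's element: s.split()[1][0].lower() (same expression A computes; none = IndexError)
def bRawLetter? (student : String) : Option Char :=
  match PySem.List.pyGet? (PySem.Str.split₀ student) 1 with
  | none => none
  | some surname => (PySem.Str.pyGet? surname 0).map PySem.Chars.lowerChar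

-- the while loop: how many leading letters are ≤ bound
def cutLen : List Char → Char → Nat
  | [], _ => 0
  | c :: t, b => if c ≤ b then cutLen t b + 1 else 0

-- one iteration of B's for-loop over the four boundary letters
def cutStepB (st : List Char × List Int) (bound : Char) : List Char × List Int :=
  let n := cutLen st.1 bound
  (st.1.drop n, st.2 ++ [(n : Int)])

def group_by_surname_alt (list : List String) : List Int :=
  let letters := PySem.List.sorted
    ((list.filterMap bRawLetter?).filter (fun c => decide ('a' ≤ c ∧ c ≤ 'z')))
    (fun c => c) false
  (['i', 'p', 't', 'z'].foldl cutStepB (letters, [])).2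

-- ===== PRECONDITION & SPEC =====
-- Pre_ excludes exactly the inputs where A raises IndexError: a student whose split() has fewer than 2 tokens.
def Pre_group_by_surname (list : List String) : Prop :=
  ∀ s ∈ list, 2 ≤ (PySem.Str.split₀ s).length
instance (list : List String) : Decidable (Pre_group_by_surname list) := by unfold Pre_group_by_surname; infer_instance
def pvWitness_group_by_surname : List String := ["Anna Smith", "Bob jones", "Eva  zed"]

def Spec_group_by_surname (list : List String) (out : List Int) : Prop := out = group_by_surname_alt list
instance (list : List String) (out : List Int) : Decidable (Spec_group_by_surname list out) := by unfold Spec_group_by_surname; infer_instance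

-- ===== CLAIM =====
def Claim_equal_group_by_surname : Prop := ∀ (list : List String), Dom_group_by_surname list → Pre_group_by_surname list → Spec_group_by_surname list (group_by_surname list)

-- ===== LEMMAS AND PROOFS =====

theorem bRaw_eq_pyLetterA : bRawLetter? = pyLetterA? := rfl

-- count (as Int) of students whose A-letter satisfies p
def cnt (l : List String) (p : Char → Bool) : Int := ((l.filterMap pyLetterA?).countP p : Int)

def pA (c : Char) : Bool := decide ('a' ≤ c ∧ c ≤ 'i')
def pB (c : Char) : Bool := decide ('j' ≤ c ∧ c ≤ 'p')
def pC (c : Char) : Bool := decide ('q' ≤ c ∧ c ≤ 't')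
def pD (c : Char) : Bool := decide ('u' ≤ c ∧ c ≤ 'z')

theorem cnt_cons_some (s : String) (l : List String) (c : Char) (hs : pyLetterA? s = some c)
    (p : Char → Bool) : cnt (s :: l) p = cnt l p + (if p c then 1 else 0) := by
  simp only [cnt, List.filterMap_cons, hs, List.countP_cons]
  split_ifs <;> simp

theorem foldA (l : List String) : ∀ d : PySem.Dict String Int,
    d.contains "A-I" = true → d.contains "J-P" = true →
    d.contains "Q-T" = true → d.contains "U-Z" = true →
    (l.foldl groupStepA d).keys = d.keys ∧
    (l.foldl groupStepA d).getD "A-I" 0 = d.getD "A-I" 0 + cnt l pA ∧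
    (l.foldl groupStepA d).getD "J-P" 0 = d.getD "J-P" 0 + cnt l pB ∧
    (l.foldl groupStepA d).getD "Q-T" 0 = d.getD "Q-T" 0 + cnt l pC ∧
    (l.foldl groupStepA d).getD "U-Z" 0 = d.getD "U-Z" 0 + cnt l pD := by
  induction l with
  | nil => intro d _ _ _ _; simp [cnt]
  | cons s l ih =>
    intro d h1 h2 h3 h4
    rw [List.foldl_cons]
    rcases hs : pyLetterA? s with _ | c
    · have h := ih d h1 h2 h3 h4
      simpa [groupStepA, hs, cnt, List.filterMap_cons] using h
    · simp only [groupStepA, hs]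
      split_ifs with c1 c2 c3 c4
      have hpA : pA c = true := by simp only [pA, decide_eq_true_eq]; exact c1
      have hpB : pB c = false := by
        simp only [pB, decide_eq_false_iff_not]; rintro ⟨hx, -⟩
        exact absurd (le_trans hx c1.2) (by decide)
      have hpC : pC c = false := by
        simp only [pC, decide_eq_false_iff_not]; rintro ⟨hx, -⟩
        exact absurd (le_trans hx c1.2) (by decide)
      have hpD : pD c = false := by
        simp only [pD, decide_eq_false_iff_not]; rintro ⟨hx, -⟩
        exact absurd (le_trans hx c1.2) (by decide)
      obtain ⟨hk, hA, hB, hC, hD⟩ := ih (d.modify "A-I" 0 (· + 1))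
        (by simp [PySem.Dict.contains_modify, h1]) (by simp [PySem.Dict.contains_modify, h2])
        (by simp [PySem.Dict.contains_modify, h3]) (by simp [PySem.Dict.contains_modify, h4])
      refine ⟨?_, ?_, ?_, ?_, ?_⟩
      · rw [hk, PySem.Dict.keys_modify, PySem.Dict.keys_insert_of_contains _ _ (by assumption)]
      · rw [hA, cnt_cons_some s l c hs, PySem.Dict.getD_modify]; simp [hpA]; try omega
      · rw [hB, cnt_cons_some s l c hs, PySem.Dict.getD_modify]; simp [hpB]; try omega
      · rw [hC, cnt_cons_some s l c hs, PySem.Dict.getD_modify]; simp [hpC]; try omega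
      · rw [hD, cnt_cons_some s l c hs, PySem.Dict.getD_modify]; simp [hpD]; try omega
      have hpA : pA c = false := by
        simp only [pA, decide_eq_false_iff_not]; rintro ⟨-, hx⟩
        exact absurd (le_trans c2.1 hx) (by decide)
      have hpB : pB c = true := by simp only [pB, decide_eq_true_eq]; exact c2
      have hpC : pC c = false := by
        simp only [pC, decide_eq_false_iff_not]; rintro ⟨hx, -⟩
        exact absurd (le_trans hx c2.2) (by decide)
      have hpD : pD c = false := by
        simp only [pD, decide_eq_false_iff_not]; rintro ⟨hx, -⟩
        exact absurd (le_trans hx c2.2) (by decide)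
      obtain ⟨hk, hA, hB, hC, hD⟩ := ih (d.modify "J-P" 0 (· + 1))
        (by simp [PySem.Dict.contains_modify, h1]) (by simp [PySem.Dict.contains_modify, h2])
        (by simp [PySem.Dict.contains_modify, h3]) (by simp [PySem.Dict.contains_modify, h4])
      refine ⟨?_, ?_, ?_, ?_, ?_⟩
      · rw [hk, PySem.Dict.keys_modify, PySem.Dict.keys_insert_of_contains _ _ (by assumption)]
      · rw [hA, cnt_cons_some s l c hs, PySem.Dict.getD_modify]; simp [hpA]; try omega
      · rw [hB, cnt_cons_some s l c hs, PySem.Dict.getD_modify]; simp [hpB]; try omega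
      · rw [hC, cnt_cons_some s l c hs, PySem.Dict.getD_modify]; simp [hpC]; try omega
      · rw [hD, cnt_cons_some s l c hs, PySem.Dict.getD_modify]; simp [hpD]; try omega
      have hpA : pA c = false := by
        simp only [pA, decide_eq_false_iff_not]; rintro ⟨-, hx⟩
        exact absurd (le_trans c3.1 hx) (by decide)
      have hpB : pB c = false := by
        simp only [pB, decide_eq_false_iff_not]; rintro ⟨-, hx⟩
        exact absurd (le_trans c3.1 hx) (by decide)
      have hpC : pC c = true := by simp only [pC, decide_eq_true_eq]; exact c3
      have hpD : pD c = false := by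
        simp only [pD, decide_eq_false_iff_not]; rintro ⟨hx, -⟩
        exact absurd (le_trans hx c3.2) (by decide)
      obtain ⟨hk, hA, hB, hC, hD⟩ := ih (d.modify "Q-T" 0 (· + 1))
        (by simp [PySem.Dict.contains_modify, h1]) (by simp [PySem.Dict.contains_modify, h2])
        (by simp [PySem.Dict.contains_modify, h3]) (by simp [PySem.Dict.contains_modify, h4])
      refine ⟨?_, ?_, ?_, ?_, ?_⟩
      · rw [hk, PySem.Dict.keys_modify, PySem.Dict.keys_insert_of_contains _ _ (by assumption)]
      · rw [hA, cnt_cons_some s l c hs, PySem.Dict.getD_modify]; simp [hpA]; try omega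
      · rw [hB, cnt_cons_some s l c hs, PySem.Dict.getD_modify]; simp [hpB]; try omega
      · rw [hC, cnt_cons_some s l c hs, PySem.Dict.getD_modify]; simp [hpC]; try omega
      · rw [hD, cnt_cons_some s l c hs, PySem.Dict.getD_modify]; simp [hpD]; try omega
      have hpA : pA c = false := by
        simp only [pA, decide_eq_false_iff_not]; rintro ⟨-, hx⟩
        exact absurd (le_trans c4.1 hx) (by decide)
      have hpB : pB c = false := by
        simp only [pB, decide_eq_false_iff_not]; rintro ⟨-, hx⟩
        exact absurd (le_trans c4.1 hx) (by decide)
      have hpC : pC c = false := by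
        simp only [pC, decide_eq_false_iff_not]; rintro ⟨-, hx⟩
        exact absurd (le_trans c4.1 hx) (by decide)
      have hpD : pD c = true := by simp only [pD, decide_eq_true_eq]; exact c4
      obtain ⟨hk, hA, hB, hC, hD⟩ := ih (d.modify "U-Z" 0 (· + 1))
        (by simp [PySem.Dict.contains_modify, h1]) (by simp [PySem.Dict.contains_modify, h2])
        (by simp [PySem.Dict.contains_modify, h3]) (by simp [PySem.Dict.contains_modify, h4])
      refine ⟨?_, ?_, ?_, ?_, ?_⟩
      · rw [hk, PySem.Dict.keys_modify, PySem.Dict.keys_insert_of_contains _ _ (by assumption)]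
      · rw [hA, cnt_cons_some s l c hs, PySem.Dict.getD_modify]; simp [hpA]; try omega
      · rw [hB, cnt_cons_some s l c hs, PySem.Dict.getD_modify]; simp [hpB]; try omega
      · rw [hC, cnt_cons_some s l c hs, PySem.Dict.getD_modify]; simp [hpC]; try omega
      · rw [hD, cnt_cons_some s l c hs, PySem.Dict.getD_modify]; simp [hpD]; try omega
      have hpA : pA c = false := by simp only [pA, decide_eq_false_iff_not]; exact c1
      have hpB : pB c = false := by simp only [pB, decide_eq_false_iff_not]; exact c2
      have hpC : pC c = false := by simp only [pC, decide_eq_false_iff_not]; exact c3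
      have hpD : pD c = false := by simp only [pD, decide_eq_false_iff_not]; exact c4
      obtain ⟨hk, hA, hB, hC, hD⟩ := ih d h1 h2 h3 h4
      refine ⟨hk, ?_, ?_, ?_, ?_⟩
      · rw [hA, cnt_cons_some s l c hs]; simp [hpA]
      · rw [hB, cnt_cons_some s l c hs]; simp [hpB]
      · rw [hC, cnt_cons_some s l c hs]; simp [hpC]
      · rw [hD, cnt_cons_some s l c hs]; simp [hpD]


-- the while loop on a sorted run: prefix length = count ≤ bound, remainder = the letters > bound
theorem cut_sorted (L : List Char) (b : Char) (h : L.Pairwise (· ≤ ·)) :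
    cutLen L b = L.countP (fun c => decide (c ≤ b)) ∧
    L.drop (cutLen L b) = L.filter (fun c => decide (b < c)) := by
  induction L with
  | nil => simp [cutLen]
  | cons a t ih =>
    obtain ⟨ha, ht⟩ := List.pairwise_cons.mp h
    obtain ⟨ih1, ih2⟩ := ih ht
    by_cases hab : a ≤ b
    · refine ⟨?_, ?_⟩
      · simp [cutLen, hab, ih1]
      · simp [cutLen, hab, ih2, not_lt.mpr hab]
    · have hall : ∀ x ∈ a :: t, ¬ x ≤ b := by
        intro x hx
        rcases List.mem_cons.mp hx with rfl | hx
        · exact hab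
        · exact fun hxb => hab (le_trans (ha x hx) hxb)
      refine ⟨?_, ?_⟩
      · rw [show cutLen (a :: t) b = 0 from by simp [cutLen, hab]]
        symm
        simp only [List.countP_eq_zero]
        intro x hx
        simpa using hall x hx
      · rw [show cutLen (a :: t) b = 0 from by simp [cutLen, hab]]
        rw [List.drop_zero, List.filter_eq_self.mpr]
        intro x hx
        simpa using lt_of_not_ge (hall x hx)

theorem countP_az_A (m : List Char) :
    m.countP (fun c => decide (c ≤ 'i') && decide ('a' ≤ c ∧ c ≤ 'z')) = m.countP pA :=
  List.countP_congr (by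
    intro c _
    simp only [pA, Bool.and_eq_true, decide_eq_true_eq, Char.le_def,
      UInt32.le_iff_toNat_le,
      show 'a'.val.toNat = 97 from rfl, show 'i'.val.toNat = 105 from rfl,
      show 'z'.val.toNat = 122 from rfl]
    omega)

theorem countP_az_B (m : List Char) :
    m.countP (fun c => (decide (c ≤ 'p') && decide ('i' < c)) && decide ('a' ≤ c ∧ c ≤ 'z')) = m.countP pB :=
  List.countP_congr (by
    intro c _
    simp only [pB, Bool.and_eq_true, decide_eq_true_eq, Char.le_def, Char.lt_def,
      UInt32.le_iff_toNat_le, UInt32.lt_iff_toNat_lt,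
      show 'a'.val.toNat = 97 from rfl, show 'i'.val.toNat = 105 from rfl,
      show 'j'.val.toNat = 106 from rfl, show 'p'.val.toNat = 112 from rfl,
      show 'z'.val.toNat = 122 from rfl]
    omega)

theorem countP_az_C (m : List Char) :
    m.countP (fun c => ((decide (c ≤ 't') && decide ('p' < c)) && decide ('i' < c)) && decide ('a' ≤ c ∧ c ≤ 'z')) = m.countP pC :=
  List.countP_congr (by
    intro c _
    simp only [pC, Bool.and_eq_true, decide_eq_true_eq, Char.le_def, Char.lt_def,
      UInt32.le_iff_toNat_le, UInt32.lt_iff_toNat_lt,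
      show 'a'.val.toNat = 97 from rfl, show 'i'.val.toNat = 105 from rfl,
      show 'p'.val.toNat = 112 from rfl, show 'q'.val.toNat = 113 from rfl,
      show 't'.val.toNat = 116 from rfl, show 'z'.val.toNat = 122 from rfl]
    omega)

theorem countP_az_D (m : List Char) :
    m.countP (fun c => (((decide (c ≤ 'z') && decide ('t' < c)) && decide ('p' < c)) && decide ('i' < c)) && decide ('a' ≤ c ∧ c ≤ 'z')) = m.countP pD :=
  List.countP_congr (by
    intro c _
    simp only [pD, Bool.and_eq_true, decide_eq_true_eq, Char.le_def, Char.lt_def,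
      UInt32.le_iff_toNat_le, UInt32.lt_iff_toNat_lt,
      show 'a'.val.toNat = 97 from rfl, show 'i'.val.toNat = 105 from rfl,
      show 'p'.val.toNat = 112 from rfl, show 't'.val.toNat = 116 from rfl,
      show 'u'.val.toNat = 117 from rfl, show 'z'.val.toNat = 122 from rfl]
    omega)

theorem group_by_surname_spec : Claim_equal_group_by_surname := by
  intro l _ _
  unfold Spec_group_by_surname group_by_surname group_by_surname_alt
  obtain ⟨hk, hA, hB, hC, hD⟩ := foldA l
      (PySem.Dict.ofList [("A-I", (0 : Int)), ("J-P", 0), ("Q-T", 0), ("U-Z", 0)])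
      (by decide) (by decide) (by decide) (by decide)
  have hkeys : (PySem.Dict.ofList [("A-I", (0 : Int)), ("J-P", 0), ("Q-T", 0), ("U-Z", 0)]).keys
      = ["A-I", "J-P", "Q-T", "U-Z"] := by decide
  -- B side data
  have hp0 := PySem.List.sorted_pairwise
      ((l.filterMap bRawLetter?).filter (fun c => decide ('a' ≤ c ∧ c ≤ 'z'))) (fun c => c)
  obtain ⟨hn0, he0⟩ := cut_sorted _ 'i' hp0
  have hp1 := hp0.filter (fun c => decide ('i' < c))
  obtain ⟨hn1, he1⟩ := cut_sorted _ 'p' hp1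
  have hp2 := hp1.filter (fun c => decide ('p' < c))
  obtain ⟨hn2, he2⟩ := cut_sorted _ 't' hp2
  have hp3 := hp2.filter (fun c => decide ('t' < c))
  obtain ⟨hn3, he3⟩ := cut_sorted _ 'z' hp3
  have hperm := PySem.List.sorted_perm
      ((l.filterMap bRawLetter?).filter (fun c => decide ('a' ≤ c ∧ c ≤ 'z'))) (fun c => c) false
  simp only [hk, hkeys, List.map_cons, List.map_nil, List.foldl_cons, List.foldl_nil, cutStepB]
  rw [hA, hB, hC, hD, he0]
  rw [he1, he2]
  rw [hn0, hn1, hn2, hn3]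
  simp only [List.countP_filter]
  rw [List.Perm.countP_eq _ hperm, List.Perm.countP_eq _ hperm,
      List.Perm.countP_eq _ hperm, List.Perm.countP_eq _ hperm]
  simp only [List.countP_filter]
  rw [bRaw_eq_pyLetterA]
  rw [countP_az_A, countP_az_B, countP_az_C, countP_az_D]
  simp [cnt]
  exact ⟨by decide, by decide, by decide, by decide⟩
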